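-- pv_equiv track=rewrite | github.com/tuqigo/AI-QuestionBank-Generator | backend/utils/json_validator.py | _fix_latex_escapes
-- ===== SOURCE A (Python) =====
-- def _fix_latex_escapes(json_str: str) -> str:
--     """
--     修复 JSON 字符串中的 LaTeX 转义问题
--
--     AI 有时会返回单反斜杠的 LaTeX 命令（如 \div），这在 JSON 中是无效的。
--     需要将单反斜杠替换成双反斜杠（\\div），这样 JSON 解析后才是正确的 LaTeX。
--
--     Args:
--         json_str: 原始 JSON 字符串
--
--     Returns:
--         修复后的 JSON 字符串
--     """
--     # 方法：遍历所有 $...$ 公式环境，修复其中的 LaTeX 转义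
--
--     LATEX_COMMANDS = [
--         'frac', 'times', 'div', 'pm', 'mp', 'ldots', 'cdots',
--         'geq', 'leq', 'neq', 'approx', 'rightarrow', 'leftarrow',
--         'Rightarrow', 'Leftarrow', 'Leftrightarrow', 'infty',
--         'sqrt', 'sin', 'cos', 'tan', 'log', 'ln',
--         'sum', 'int', 'partial', 'nabla', 'bullet', 'cdot',
--         'circ', 'degree', 'prime', 'text', 'math', 'begin', 'end',
--         'pi', 'theta', 'alpha', 'beta', 'gamma', 'delta', 'epsilon',
--         'angle', 'triangle', 'perp', 'parallel', 'cup', 'cap',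
--         'subset', 'supset', 'subseteq', 'supseteq', 'in', 'notin',
--         'forall', 'exists', 'to', 'mapsto', 'iff', 'hbar', 'omega'
--     ]
--
--     def fix_formula_content(content):
--         """修复公式内容中的 LaTeX 转义"""
--         # 替换 \command 为 \\command（只在 \ 前面不是另一个 \ 的情况下）
--         # 使用逐字符扫描，更可靠
--         result = []
--         i = 0
--         while i < len(content):
--             if content[i] == '\\' and i + 1 < len(content):
--                 # 检查是否是双反斜杠
--                 if content[i + 1] == '\\':
--                     # 已经是双反斜杠，保留
--                     result.append('\\\\')
--                     i += 2
--                     continue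
--
--                 # 检查是否是 LaTeX 命令
--                 cmd_start = i + 1
--                 cmd_end = cmd_start
--                 while cmd_end < len(content) and content[cmd_end].isalpha():
--                     cmd_end += 1
--                 cmd = content[cmd_start:cmd_end]
--
--                 if cmd in LATEX_COMMANDS:
--                     # 这是单反斜杠的 LaTeX 命令，替换为双反斜杠
--                     result.append('\\\\' + cmd)
--                     i = cmd_end
--                 else:
--                     # 不是 LaTeX 命令，保留原样
--                     result.append(content[i])
--                     i += 1
--             else:
--                 result.append(content[i])
--                 i += 1
--
--         return ''.join(result)
--
--     # 匹配 $...$ 公式环境（非贪婪）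
--     result = []
--     i = 0
--     while i < len(json_str):
--         if json_str[i] == '$':
--             # 找到匹配的结束 $
--             j = i + 1
--             while j < len(json_str) and json_str[j] != '$':
--                 j += 1
--
--             if j < len(json_str):
--                 # 找到了匹配的 $
--                 formula = json_str[i:j + 1]
--                 # 修复公式中的 LaTeX 转义
--                 fixed_formula = fix_formula_content(formula)
--                 result.append(fixed_formula)
--                 i = j + 1
--             else:
--                 # 没有匹配的 $
--                 result.append(json_str[i])
--                 i += 1
--         else:
--             result.append(json_str[i])
--             i += 1
--
--     return ''.join(result)
-- ===== SOURCE B (Python) =====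
-- LATEX_COMMANDS = frozenset([
--     'frac', 'times', 'div', 'pm', 'mp', 'ldots', 'cdots',
--     'geq', 'leq', 'neq', 'approx', 'rightarrow', 'leftarrow',
--     'Rightarrow', 'Leftarrow', 'Leftrightarrow', 'infty',
--     'sqrt', 'sin', 'cos', 'tan', 'log', 'ln',
--     'sum', 'int', 'partial', 'nabla', 'bullet', 'cdot',
--     'circ', 'degree', 'prime', 'text', 'math', 'begin', 'end',
--     'pi', 'theta', 'alpha', 'beta', 'gamma', 'delta', 'epsilon',
--     'angle', 'triangle', 'perp', 'parallel', 'cup', 'cap',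
--     'subset', 'supset', 'subseteq', 'supseteq', 'in', 'notin',
--     'forall', 'exists', 'to', 'mapsto', 'iff', 'hbar', 'omega'
-- ])
--
--
-- def _fix_part(p):
--     # p is the text following one lone backslash; double that backslash
--     # iff p's maximal leading alphabetic run is a known LaTeX command
--     k = 0
--     while k < len(p) and p[k].isalpha():
--         k += 1
--     return ('\\\\' if p[:k] in LATEX_COMMANDS else '\\') + p
--
--
-- def _fix_formula(content):
--     # split on single backslashes; an empty part followed by another part
--     # marks an already-escaped backslash pair, which is kept as-is
--     parts = content.split('\\')
--     out = [parts[0]]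
--     i = 1
--     while i < len(parts):
--         if parts[i] == '' and i + 1 < len(parts):
--             out.append('\\\\' + parts[i + 1])
--             i += 2
--         else:
--             out.append(_fix_part(parts[i]))
--             i += 1
--     return ''.join(out)
--
--
-- def _fix_latex_escapes(json_str: str) -> str:
--     parts = json_str.split('$')
--     out = [parts[0]]
--     i = 1
--     while i < len(parts):
--         if i + 1 < len(parts):
--             out.append('$' + _fix_formula(parts[i]) + '$' + parts[i + 1])
--             i += 2
--         else:
--             out.append('$' + parts[i])  # unmatched trailing '$'
--             i += 1
--     return ''.join(out)
-- ===== Notes on version B (the rewrite author's own statement) =====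
-- stated objective: simpler
-- what changed: Replaces A's two hand-written index-scanning while-loops (manual i/j cursors with lookahead) by str.split passes: split('$') with a pairwise walk over the parts to find closed $...$ regions, and inside each region split('\') where an empty part marks an already-escaped pair and every other part starts right after a lone backslash.
import Mathlib
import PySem

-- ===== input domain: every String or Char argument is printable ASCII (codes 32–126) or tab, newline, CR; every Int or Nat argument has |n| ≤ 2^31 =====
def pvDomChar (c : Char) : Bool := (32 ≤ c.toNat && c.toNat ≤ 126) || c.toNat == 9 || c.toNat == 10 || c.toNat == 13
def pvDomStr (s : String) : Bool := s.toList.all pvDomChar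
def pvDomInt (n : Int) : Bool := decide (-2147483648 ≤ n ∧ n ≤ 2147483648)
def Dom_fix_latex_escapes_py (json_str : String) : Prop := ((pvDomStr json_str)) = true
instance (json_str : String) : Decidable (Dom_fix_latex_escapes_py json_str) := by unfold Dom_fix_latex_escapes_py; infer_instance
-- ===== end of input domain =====

-- B replaces A's two hand-written index-scanning loops by split('$')/split('\\') passes
-- with a pairwise walk over the parts (objective: simpler); same return value everywhere.

-- The LATEX_COMMANDS table (identical constant in both Pythons) and the 'cmd in LATEX_COMMANDS' test
def latexCommands : List (List Char) :=
  (["frac", "times", "div", "pm", "mp", "ldots", "cdots",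
    "geq", "leq", "neq", "approx", "rightarrow", "leftarrow",
    "Rightarrow", "Leftarrow", "Leftrightarrow", "infty",
    "sqrt", "sin", "cos", "tan", "log", "ln",
    "sum", "int", "partial", "nabla", "bullet", "cdot",
    "circ", "degree", "prime", "text", "math", "begin", "end",
    "pi", "theta", "alpha", "beta", "gamma", "delta", "epsilon",
    "angle", "triangle", "perp", "parallel", "cup", "cap",
    "subset", "supset", "subseteq", "supseteq", "in", "notin",
    "forall", "exists", "to", "mapsto", "iff", "hbar", "omega"]).map String.toList

def isCmd (cs : List Char) : Bool := latexCommands.contains cs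

-- ===== PORT A =====
-- inner while-loop of A (fix_formula_content): char-by-char scan with lookahead
def fixFormulaA : List Char → List Char
  | [] => []
  | c :: rest =>
    if c = '\\' then
      match h : rest with
      | [] => ['\\']                                       -- lone backslash at the end: i+1 < len fails
      | d :: rest2 =>
        if d = '\\' then '\\' :: '\\' :: fixFormulaA rest2 -- already-escaped pair, kept
        else
          -- cmd = maximal alphabetic run after the backslash
          if isCmd ((d :: rest2).takeWhile PySem.Chars.isalpha) then
            '\\' :: '\\' :: (((d :: rest2).takeWhile PySem.Chars.isalpha) ++
              fixFormulaA ((d :: rest2).dropWhile PySem.Chars.isalpha))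
          else '\\' :: fixFormulaA (d :: rest2)
    else c :: fixFormulaA rest
termination_by l => l.length
decreasing_by
  all_goals try subst h
  all_goals
    first
      | (have h2 := List.length_dropWhile_le PySem.Chars.isalpha (d :: rest2)
         simp at h2 ⊢; omega)
      | (simp <;> omega)

-- outer while-loop of A: find '$'…'$' regions, fix each region, copy the rest
def scanA : List Char → List Char
  | [] => []
  | c :: rest =>
    if c = '$' then
      match h : rest.dropWhile (· != '$') with
      | [] => '$' :: scanA rest                            -- no matching '$'
      | _ :: suf =>
        fixFormulaA ('$' :: rest.takeWhile (· != '$') ++ ['$']) ++ scanA suf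
    else c :: scanA rest
termination_by l => l.length
decreasing_by
  all_goals
    first
      | (have h2 := List.length_dropWhile_le (fun x => x != '$') rest
         rw [h] at h2; simp at h2 ⊢; omega)
      | (simp <;> omega)

def fix_latex_escapes_py (json_str : String) : String := String.mk (scanA json_str.toList)

-- ===== PORT B =====
-- _fix_part: double the backslash iff the maximal leading alphabetic run is a known command
def fixPartB (p : List Char) : List Char :=
  (if isCmd (p.takeWhile PySem.Chars.isalpha) then ['\\', '\\'] else ['\\']) ++ p

-- the while loop of _fix_formula over parts[1:]
def goFormulaB : List (List Char) → List Char
  | [] => []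
  | [p] => fixPartB p                                      -- i + 1 < len(parts) fails
  | p :: q :: rest =>
    if p = [] then '\\' :: '\\' :: (q ++ goFormulaB rest)  -- escaped pair, kept
    else fixPartB p ++ goFormulaB (q :: rest)

-- _fix_formula: content.split('\\'); parts[0], then the walk over parts[1:]
def fixFormulaB (content : List Char) : List Char :=
  ((content.splitOn '\\').headD []) ++ goFormulaB ((content.splitOn '\\').tail)

-- the while loop of _fix_latex_escapes over parts[1:]
def goTopB : List (List Char) → List Char
  | [] => []
  | [f] => '$' :: f                                        -- unmatched trailing '$'
  | f :: o :: rest => '$' :: (fixFormulaB f ++ '$' :: (o ++ goTopB rest))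

-- json_str.split('$'); parts[0], then the walk over parts[1:]
def fix_latex_escapes_py_alt (json_str : String) : String :=
  String.mk (((json_str.toList.splitOn '$').headD []) ++ goTopB ((json_str.toList.splitOn '$').tail))

-- ===== PRECONDITION & SPEC =====
def Spec_fix_latex_escapes_py (json_str : String) (out : String) : Prop := out = fix_latex_escapes_py_alt json_str
instance (json_str : String) (out : String) : Decidable (Spec_fix_latex_escapes_py json_str out) := by unfold Spec_fix_latex_escapes_py; infer_instance

-- ===== CLAIM (what is proved, stated in full; the proofs are below) =====
def Claim_equal_fix_latex_escapes_py : Prop := ∀ (json_str : String), Dom_fix_latex_escapes_py json_str → Spec_fix_latex_escapes_py json_str (fix_latex_escapes_py json_str)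

-- ===== LEMMAS AND PROOFS =====

-- shape lemmas for the two well-founded recursions of port A
theorem fixA_nil : fixFormulaA [] = [] := by rw [fixFormulaA.eq_def]

theorem fixA_bs_nil : fixFormulaA ['\\'] = ['\\'] := by
  rw [fixFormulaA.eq_def]
  split
  · rename_i heq; simp at heq
  · rename_i heq; cases heq
    rw [if_pos rfl]

theorem fixA_bs_bs (rest2 : List Char) :
    fixFormulaA ('\\' :: '\\' :: rest2) = '\\' :: '\\' :: fixFormulaA rest2 := by
  rw [fixFormulaA.eq_def]
  split
  · rename_i heq; simp at heq
  · rename_i heq; cases heq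
    rw [if_pos rfl]
    simp

theorem fixA_bs_other (d : Char) (rest2 : List Char) (hd : d ≠ '\\') :
    fixFormulaA ('\\' :: d :: rest2) =
      if isCmd ((d :: rest2).takeWhile PySem.Chars.isalpha) then
        '\\' :: '\\' :: (((d :: rest2).takeWhile PySem.Chars.isalpha) ++
          fixFormulaA ((d :: rest2).dropWhile PySem.Chars.isalpha))
      else '\\' :: fixFormulaA (d :: rest2) := by
  rw [fixFormulaA.eq_def]
  split
  · rename_i heq; simp at heq
  · rename_i heq; cases heq
    rw [if_pos rfl]
    simp [hd]

theorem fixA_other (c : Char) (rest : List Char) (hc : c ≠ '\\') :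
    fixFormulaA (c :: rest) = c :: fixFormulaA rest := by
  rw [fixFormulaA.eq_def]
  split
  · rename_i heq; simp at heq
  · rename_i heq; cases heq
    rw [if_neg hc]

theorem scanA_nil : scanA [] = [] := by rw [scanA.eq_def]

theorem scanA_dollar_none (rest : List Char) (h : rest.dropWhile (· != '$') = []) :
    scanA ('$' :: rest) = '$' :: scanA rest := by
  rw [scanA.eq_def]
  split
  · rename_i heq; simp at heq
  · rename_i heq; cases heq
    rw [if_pos rfl]
    split
    · rfl
    · rename_i heq2; rw [h] at heq2; simp at heq2

theorem scanA_dollar_some (rest : List Char) (e : Char) (suf : List Char)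
    (h : rest.dropWhile (· != '$') = e :: suf) :
    scanA ('$' :: rest) =
      fixFormulaA ('$' :: rest.takeWhile (· != '$') ++ ['$']) ++ scanA suf := by
  rw [scanA.eq_def]
  split
  · rename_i heq; simp at heq
  · rename_i heq; cases heq
    rw [if_pos rfl]
    split
    · rename_i heq2; rw [h] at heq2; simp at heq2
    · rename_i e' suf' heq2; rw [h] at heq2
      cases heq2; rfl

theorem scanA_other (c : Char) (rest : List Char) (hc : c ≠ '$') :
    scanA (c :: rest) = c :: scanA rest := by
  rw [scanA.eq_def]; simp [hc]

theorem dropWhile_head_false {P : Char → Bool} {l : List Char} {x : Char} {xs : List Char}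
    (h : l.dropWhile P = x :: xs) : P x = false := by
  induction l with
  | nil => simp at h
  | cons a t ih => by_cases ha : P a <;> simp [List.dropWhile, ha] at h <;> [exact ih h; simp [← h.1, ha]]

theorem splitOnP_prefix (P : Char → Bool) (a t : List Char) (h : ∀ x ∈ a, P x = false) :
    (a ++ t).splitOnP P = ((t.splitOnP P).modifyHead (a ++ ·)) := by
  induction a with
  | nil => cases h' : t.splitOnP P with
    | nil => exact absurd h' (List.splitOnP_ne_nil _ t)
    | cons p r => simp [h']
  | cons c a' ih =>
    have hc : P c = false := h c (by simp)
    rw [List.cons_append, List.splitOnP_cons, if_neg (by simp [hc]),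
      ih (fun x hx => h x (by simp [hx])), List.modifyHead_modifyHead]
    rfl

theorem splitOnP_head (P : Char → Bool) (t : List Char) :
    (t.splitOnP P).head? = some (t.takeWhile (fun c => !(P c))) := by
  induction t with
  | nil => simp
  | cons c t' ih =>
    rw [List.splitOnP_cons]
    by_cases hc : P c
    · simp [hc]
    · cases h' : t'.splitOnP P with
      | nil => exact absurd h' (List.splitOnP_ne_nil _ t')
      | cons p r =>
        rw [h'] at ih; simp at ih
        simp [hc, ih]

theorem isalpha_ne_bs {x : Char} (h : PySem.Chars.isalpha x = true) : (x == '\\') = false := by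
  by_contra hne
  have : x = '\\' := by simpa using hne
  subst this
  exact absurd h (by decide)

theorem takeWhile_append_last {P : Char → Bool} {x : Char} (hx : P x = false) (l : List Char) :
    (l ++ [x]).takeWhile P = l.takeWhile P := by
  induction l with
  | nil => simp [List.takeWhile_cons, hx]
  | cons c l' ih => by_cases hc : P c <;> simp [List.takeWhile_cons, hc, ih]

theorem dropWhile_append_last {P : Char → Bool} {x : Char} (hx : P x = false) (l : List Char) :
    (l ++ [x]).dropWhile P = l.dropWhile P ++ [x] := by
  induction l with
  | nil => simp [List.dropWhile_cons, hx]
  | cons c l' ih => by_cases hc : P c <;> simp [List.dropWhile_cons, hc, ih]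

theorem goFormulaB_cons_ne (p : List Char) (r : List (List Char)) (hp : p ≠ []) :
    goFormulaB (p :: r) = fixPartB p ++ goFormulaB r := by
  cases r with
  | nil => simp [goFormulaB]
  | cons q r' => rw [goFormulaB, if_neg hp]

-- the inner fix: A's scanner equals B's split-and-walk, on every content
theorem innerEq : ∀ (n : Nat) (x : List Char), x.length ≤ n → fixFormulaA x = fixFormulaB x := by
  intro n
  induction n with
  | zero =>
    intro x hx
    have : x = [] := List.length_eq_zero_iff.mp (Nat.le_zero.mp hx)
    subst this
    rw [fixA_nil]; rfl
  | succ n ih =>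
    intro x hx
    cases x with
    | nil => rw [fixA_nil]; rfl
    | cons c rest =>
      by_cases hc : c = '\\'
      · subst hc
        cases rest with
        | nil =>
          rw [fixA_bs_nil]
          simp [fixFormulaB, List.splitOn, goFormulaB, fixPartB, show isCmd [] = false from by decide]
        | cons d rest2 =>
          by_cases hd : d = '\\'
          · subst hd
            rw [fixA_bs_bs]
            obtain ⟨p, r, hpr⟩ : ∃ p r, rest2.splitOn '\\' = p :: r := by
              cases h' : rest2.splitOn '\\' with
              | nil => exact absurd h' (List.splitOnP_ne_nil _ rest2)
              | cons p r => exact ⟨p, r, rfl⟩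
            have hB2 : fixFormulaB rest2 = p ++ goFormulaB r := by
              rw [fixFormulaB, hpr]; simp
            have hIH : fixFormulaA rest2 = fixFormulaB rest2 :=
              ih rest2 (by simp at hx; omega)
            have hsp : ('\\' :: '\\' :: rest2).splitOn '\\' = [] :: [] :: p :: r := by
              show ((('\\' :: '\\' :: rest2).splitOnP (· == '\\'))) = _
              rw [List.splitOnP_cons, if_pos (by simp), List.splitOnP_cons, if_pos (by simp)]
              exact congrArg _ (congrArg _ hpr)
            rw [fixFormulaB, hsp]
            simp only [List.headD_cons, List.tail_cons, List.nil_append]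
            rw [goFormulaB, if_pos rfl, hIH, hB2]
          · -- '\\' :: d :: rest2 with d ≠ '\\'
            rw [fixA_bs_other d rest2 hd]
            set run := (d :: rest2).takeWhile PySem.Chars.isalpha with hrun_def
            set t := (d :: rest2).dropWhile PySem.Chars.isalpha with ht_def
            have hrun_alpha : ∀ x ∈ run, PySem.Chars.isalpha x = true := by
              intro x hxm; exact List.mem_takeWhile_imp hxm
            obtain ⟨q, r, hqr⟩ : ∃ q r, t.splitOn '\\' = q :: r := by
              cases h' : t.splitOn '\\' with
              | nil => exact absurd h' (List.splitOnP_ne_nil _ t)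
              | cons q r => exact ⟨q, r, rfl⟩
            have hq_tw : q = t.takeWhile (fun c => !(c == '\\')) := by
              have := splitOnP_head (· == '\\') t
              rw [show t.splitOnP (· == '\\') = q :: r from hqr] at this
              simpa using this
            have hq_alpha_nil : q.takeWhile PySem.Chars.isalpha = [] := by
              cases ht : t with
              | nil => simp [hq_tw, ht]
              | cons u t' =>
                have hu : PySem.Chars.isalpha u = false := by
                  have hdw : (d :: rest2).dropWhile PySem.Chars.isalpha = u :: t' := by
                    rw [← ht_def, ht]
                  exact dropWhile_head_false hdw
                rw [hq_tw, ht]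
                by_cases hub : (u == '\\')
                · simp [List.takeWhile_cons, hub]
                · simp only [List.takeWhile_cons, hub, Bool.not_false, if_pos]
                  simp [hu]
            have hsplit_rest : (d :: rest2).splitOn '\\' = (run ++ q) :: r := by
              have hcov : d :: rest2 = run ++ t := (List.takeWhile_append_dropWhile ..).symm
              show ((d :: rest2).splitOnP (· == '\\')) = _
              rw [hcov, splitOnP_prefix _ run t (fun x hxm => isalpha_ne_bs (hrun_alpha x hxm))]
              rw [show t.splitOnP (· == '\\') = q :: r from hqr]
              rfl
            have hsplit_all : ('\\' :: d :: rest2).splitOn '\\' = [] :: (run ++ q) :: r := by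
              show ((('\\' :: d :: rest2).splitOnP (· == '\\'))) = _
              rw [List.splitOnP_cons, if_pos (by simp)]
              exact congrArg _ hsplit_rest
            have hrq_ne : run ++ q ≠ [] := by
              by_cases hda : PySem.Chars.isalpha d
              · have : run = d :: rest2.takeWhile PySem.Chars.isalpha := by
                  rw [hrun_def]; simp [List.takeWhile_cons, hda]
                simp [this]
              · have ht_eq : t = d :: rest2 := by
                  rw [ht_def]; simp [List.dropWhile_cons, hda]
                have : q = d :: rest2.takeWhile (fun c => !(c == '\\')) := by
                  rw [hq_tw, ht_eq]
                  simp [List.takeWhile_cons, show (d == '\\') = false from by simpa using hd]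
                simp [this]
            have hrunrq : (run ++ q).takeWhile PySem.Chars.isalpha = run := by
              rw [List.takeWhile_append_of_pos hrun_alpha, hq_alpha_nil, List.append_nil]
            have hIt : fixFormulaA t = q ++ goFormulaB r := by
              have hlen : t.length ≤ n := by
                have h2 := List.length_dropWhile_le PySem.Chars.isalpha (d :: rest2)
                rw [← ht_def] at h2
                simp at hx h2; omega
              rw [ih t hlen, fixFormulaB, hqr]; simp
            have hIrest : fixFormulaA (d :: rest2) = (run ++ q) ++ goFormulaB r := by
              rw [ih (d :: rest2) (by simp at hx ⊢; omega), fixFormulaB, hsplit_rest]; simp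
            rw [fixFormulaB, hsplit_all]
            simp only [List.headD_cons, List.tail_cons, List.nil_append]
            rw [goFormulaB_cons_ne _ _ hrq_ne]
            simp only [fixPartB, hrunrq]
            by_cases hcmd : isCmd run
            · rw [if_pos hcmd, if_pos hcmd, hIt]
              simp
            · rw [if_neg hcmd, if_neg hcmd, hIrest]
              simp
      · -- c ≠ '\\'
        rw [fixA_other c rest hc]
        obtain ⟨p, r, hpr⟩ : ∃ p r, rest.splitOn '\\' = p :: r := by
          cases h' : rest.splitOn '\\' with
          | nil => exact absurd h' (List.splitOnP_ne_nil _ rest)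
          | cons p r => exact ⟨p, r, rfl⟩
        have hsplit : (c :: rest).splitOn '\\' = (c :: p) :: r := by
          show ((c :: rest).splitOnP (· == '\\')) = _
          rw [List.splitOnP_cons, if_neg (by simpa using hc),
            show rest.splitOnP (· == '\\') = p :: r from hpr]
          rfl
        rw [show fixFormulaB (c :: rest) = (c :: p) ++ goFormulaB r from by
          rw [fixFormulaB, hsplit]; simp]
        rw [ih rest (by simp at hx; omega), fixFormulaB, hpr]
        simp

-- fixFormulaA passes a trailing '$' through
theorem fixFormulaA_append_dollar : ∀ (n : Nat) (y : List Char), y.length ≤ n →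
    fixFormulaA (y ++ ['$']) = fixFormulaA y ++ ['$'] := by
  intro n
  induction n with
  | zero =>
    intro y hy
    have : y = [] := List.length_eq_zero_iff.mp (Nat.le_zero.mp hy)
    subst this
    rw [List.nil_append, fixA_other '$' [] (by decide)]
    simp [fixA_nil]
  | succ n ih =>
    intro y hy
    cases y with
    | nil =>
      rw [List.nil_append, fixA_other '$' [] (by decide)]
      simp [fixA_nil]
    | cons c y' =>
      by_cases hc : c = '\\'
      · subst hc
        cases y' with
        | nil =>
          rw [show ('\\' :: []) ++ ['$'] = '\\' :: '$' :: [] from rfl]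
          rw [fixA_bs_other '$' [] (by decide), fixA_bs_nil]
          rw [show (['$'] : List Char).takeWhile PySem.Chars.isalpha = [] from by decide,
            if_neg (by simp [show isCmd [] = false from by decide])]
          rw [fixA_other '$' [] (by decide)]
          simp [fixA_nil]
        | cons d y2 =>
          by_cases hd : d = '\\'
          · subst hd
            rw [show ('\\' :: '\\' :: y2) ++ ['$'] = '\\' :: '\\' :: (y2 ++ ['$']) from rfl]
            rw [fixA_bs_bs, fixA_bs_bs, ih y2 (by simp at hy; omega)]
            simp
          · rw [show ('\\' :: d :: y2) ++ ['$'] = '\\' :: (d :: (y2 ++ ['$'])) from rfl]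
            have hda : PySem.Chars.isalpha '$' = false := by decide
            have htw : (d :: (y2 ++ ['$'])).takeWhile PySem.Chars.isalpha
                = (d :: y2).takeWhile PySem.Chars.isalpha := by
              rw [show d :: (y2 ++ ['$']) = (d :: y2) ++ ['$'] from rfl]
              exact takeWhile_append_last hda (d :: y2)
            have hdw : (d :: (y2 ++ ['$'])).dropWhile PySem.Chars.isalpha
                = (d :: y2).dropWhile PySem.Chars.isalpha ++ ['$'] := by
              rw [show d :: (y2 ++ ['$']) = (d :: y2) ++ ['$'] from rfl]
              exact dropWhile_append_last hda (d :: y2)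
            rw [fixA_bs_other d (y2 ++ ['$']) hd, fixA_bs_other d y2 hd, htw, hdw]
            by_cases hcmd : isCmd ((d :: y2).takeWhile PySem.Chars.isalpha)
            · rw [if_pos hcmd, if_pos hcmd]
              rw [ih ((d :: y2).dropWhile PySem.Chars.isalpha)
                (by have h2 := List.length_dropWhile_le PySem.Chars.isalpha (d :: y2)
                    simp at hy h2 ⊢; omega)]
              simp
            · rw [if_neg hcmd, if_neg hcmd]
              rw [show d :: (y2 ++ ['$']) = (d :: y2) ++ ['$'] from rfl,
                ih (d :: y2) (by simp at hy ⊢; omega)]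
              simp
      · rw [show (c :: y') ++ ['$'] = c :: (y' ++ ['$']) from rfl]
        rw [fixA_other c _ hc, fixA_other c _ hc, ih y' (by simp at hy; omega)]
        simp

-- a '$'-free string is returned unchanged by A's outer scan
theorem scanA_no_dollar : ∀ (x : List Char), (∀ ch ∈ x, (ch != '$') = true) → scanA x = x := by
  intro x
  induction x with
  | nil => intro _; exact scanA_nil
  | cons c rest ih =>
    intro h
    have hc : c ≠ '$' := by simpa using h c (by simp)
    rw [scanA_other c rest hc, ih (fun ch hm => h ch (by simp [hm]))]

-- A's outer scan equals B's split-and-walk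
theorem outerEq : ∀ (n : Nat) (x : List Char), x.length ≤ n →
    scanA x = ((x.splitOn '$').headD []) ++ goTopB ((x.splitOn '$').tail) := by
  intro n
  induction n with
  | zero =>
    intro x hx
    have : x = [] := List.length_eq_zero_iff.mp (Nat.le_zero.mp hx)
    subst this
    rw [scanA_nil]; rfl
  | succ n ih =>
    intro x hx
    cases x with
    | nil => rw [scanA_nil]; rfl
    | cons c rest =>
      by_cases hc : c = '$'
      · subst hc
        cases hdw : rest.dropWhile (· != '$') with
        | nil =>
          have hfree : ∀ ch ∈ rest, (ch != '$') = true := by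
            intro ch hm; exact List.dropWhile_eq_nil_iff.mp hdw ch hm
          have hsplit : ('$' :: rest).splitOn '$' = [[], rest] := by
            show (('$' :: rest).splitOnP (· == '$')) = _
            rw [List.splitOnP_cons, if_pos (by simp)]
            rw [show rest = rest ++ [] from (List.append_nil rest).symm,
              splitOnP_prefix _ rest [] (fun ch hm => by simpa using hfree ch hm)]
            simp
          rw [scanA_dollar_none rest hdw, hsplit]
          simp only [List.headD_cons, List.tail_cons, List.nil_append, goTopB]
          rw [scanA_no_dollar rest hfree]
        | cons e suf =>
          have he : e = '$' := by simpa using dropWhile_head_false hdw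
          subst he
          have hcov : rest = rest.takeWhile (· != '$') ++ '$' :: suf := by
            rw [← hdw]; exact (List.takeWhile_append_dropWhile ..).symm
          obtain ⟨o, r, hor⟩ : ∃ o r, suf.splitOn '$' = o :: r := by
            cases h' : suf.splitOn '$' with
            | nil => exact absurd h' (List.splitOnP_ne_nil _ suf)
            | cons o r => exact ⟨o, r, rfl⟩
          have hsplit : ('$' :: rest).splitOn '$' = [] :: rest.takeWhile (· != '$') :: o :: r := by
            show (('$' :: rest).splitOnP (· == '$')) = _
            rw [List.splitOnP_cons, if_pos (by simp)]
            conv_lhs => rw [hcov]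
            rw [splitOnP_prefix _ _ ('$' :: suf)
                (fun ch hm => by simpa using List.mem_takeWhile_imp hm),
              List.splitOnP_cons, if_pos (by simp),
              show suf.splitOnP (· == '$') = o :: r from hor]
            simp
          have hsuf_len : suf.length ≤ n := by
            have : rest.length = (rest.takeWhile (· != '$')).length + (suf.length + 1) := by
              conv_lhs => rw [hcov]
              simp
            simp at hx; omega
          have hsufA : scanA suf = o ++ goTopB r := by
            rw [ih suf hsuf_len, hor]; simp
          have hinner : fixFormulaA ('$' :: rest.takeWhile (· != '$') ++ ['$'])
              = '$' :: (fixFormulaB (rest.takeWhile (· != '$')) ++ ['$']) := by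
            rw [show ('$' :: rest.takeWhile (· != '$') ++ ['$'])
                = '$' :: (rest.takeWhile (· != '$') ++ ['$']) from rfl,
              fixA_other '$' _ (by decide),
              fixFormulaA_append_dollar (rest.takeWhile (· != '$')).length _ (le_refl _),
              innerEq (rest.takeWhile (· != '$')).length _ (le_refl _)]
          rw [scanA_dollar_some rest '$' suf hdw, hsplit]
          simp only [List.headD_cons, List.tail_cons, List.nil_append, goTopB]
          rw [hsufA, hinner]
          simp
      · rw [scanA_other c rest hc]
        obtain ⟨p, r, hpr⟩ : ∃ p r, rest.splitOn '$' = p :: r := by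
          cases h' : rest.splitOn '$' with
          | nil => exact absurd h' (List.splitOnP_ne_nil _ rest)
          | cons p r => exact ⟨p, r, rfl⟩
        have hsplit : (c :: rest).splitOn '$' = (c :: p) :: r := by
          show ((c :: rest).splitOnP (· == '$')) = _
          rw [List.splitOnP_cons, if_neg (by simpa using hc),
            show rest.splitOnP (· == '$') = p :: r from hpr]
          rfl
        rw [hsplit, ih rest (by simp at hx; omega), hpr]
        simp

-- ===== VERDICT (by name: the statement is the Claim_ definition above) =====
theorem fix_latex_escapes_py_spec : Claim_equal_fix_latex_escapes_py := by
  intro json_str _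
  show fix_latex_escapes_py json_str = fix_latex_escapes_py_alt json_str
  rw [fix_latex_escapes_py, fix_latex_escapes_py_alt,
    outerEq json_str.toList.length json_str.toList (le_refl _)]
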